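-- pv_equiv track=rewrite | github.com/Wenszel/agh-algorithms-and-data-structures | lab_06/universal_sink.py | is_universal_sink
-- ===== SOURCE A (Python) =====
-- def is_universal_sink(G):
--     possible_sinks = []
--     for i in range(len(G)):
--         if len(G[i]) == 0:
--             possible_sinks.append(i)
--     if len(possible_sinks) == 0:
--         return False
--     for s in possible_sinks:
--         for i in range(len(G)):
--             if i != s:
--                 if s not in G[i]:
--                     return False
--     return True
-- ===== SOURCE B (Python) =====
-- def is_universal_sink(G):
--     # Count, for each vertex v, the number of rows that contain v (distinct
--     # membership), then a sink i is universal iff that count is n-1.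
--     n = len(G)
--     pred_count = {}
--     for row in G:
--         for v in set(row):
--             pred_count[v] = pred_count.get(v, 0) + 1
--     found = False
--     for i, row in enumerate(G):
--         if not row:
--             if pred_count.get(i, 0) != n - 1:
--                 return False
--             found = True
--     return found
-- ===== Notes on version B (the rewrite author's own statement) =====
-- stated objective: alternative
-- what changed: A rescans every row for every candidate sink (nested membership scans per sink); B instead builds a predecessor-count table in one pass over all rows (deduplicated) and then checks each empty row's index against count == n-1, trading A's early exits for a single counting pass.
import Mathlib
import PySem

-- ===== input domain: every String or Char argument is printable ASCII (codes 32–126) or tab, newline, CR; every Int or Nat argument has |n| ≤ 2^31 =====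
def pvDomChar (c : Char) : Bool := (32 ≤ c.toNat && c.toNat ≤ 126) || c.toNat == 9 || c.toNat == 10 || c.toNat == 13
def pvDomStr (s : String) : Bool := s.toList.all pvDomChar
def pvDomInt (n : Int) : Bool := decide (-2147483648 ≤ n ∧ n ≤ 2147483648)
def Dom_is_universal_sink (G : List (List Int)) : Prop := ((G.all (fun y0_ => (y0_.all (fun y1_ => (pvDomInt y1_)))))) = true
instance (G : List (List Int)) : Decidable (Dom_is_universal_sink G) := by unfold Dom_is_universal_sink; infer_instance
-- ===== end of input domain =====

-- B replaces A's per-sink rescans of all rows by one predecessor-count table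
-- (rows deduplicated) followed by a single check of each empty row's index
-- against count = n-1 (objective: alternative algorithm, same return value).

-- ===== PORT A =====
def is_universal_sink (G : List (List Int)) : Bool :=
  let possible_sinks :=
    (PySem.List.pyRange 0 (G.length : Int) 1).foldl
      (fun acc i => if (PySem.List.pyGetD G i []).length == 0 then acc ++ [i] else acc) []
  if possible_sinks.length == 0 then false
  else
    possible_sinks.all (fun s =>
      (PySem.List.pyRange 0 (G.length : Int) 1).all (fun i =>
        if i != s then decide (s ∈ PySem.List.pyGetD G i []) else true))

-- ===== PORT B =====
-- pred_count[v] = pred_count.get(v, 0) + 1, over 'for v in set(row)'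
def bCounts (G : List (List Int)) : PySem.Dict Int Int :=
  G.foldl (fun d row => (PySem.Set.ofList row).foldl (fun d v => d.modify v 0 (· + 1)) d)
    PySem.Dict.empty

def bLoop (d : PySem.Dict Int Int) (n : Int) : List (Int × List Int) → Bool → Bool
  | [], found => found
  | (i, row) :: rest, found =>
    if row.isEmpty then
      if d.getD i 0 != n - 1 then false else bLoop d n rest true
    else bLoop d n rest found

def is_universal_sink_alt (G : List (List Int)) : Bool :=
  bLoop (bCounts G) (G.length : Int) (PySem.List.enumerate G 0) false


-- ===== PRECONDITION & SPEC =====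
def Spec_is_universal_sink (G : List (List Int)) (out : Bool) : Prop := out = is_universal_sink_alt G
instance (G : List (List Int)) (out : Bool) : Decidable (Spec_is_universal_sink G out) := by unfold Spec_is_universal_sink; infer_instance

-- ===== CLAIM (what is proved, stated in full; the proofs are below) =====
def Claim_equal_is_universal_sink : Prop := ∀ (G : List (List Int)), Dom_is_universal_sink G → Spec_is_universal_sink G (is_universal_sink G)

-- ===== LEMMAS AND PROOFS =====

theorem bCounts_getD (G : List (List Int)) (s : Int) :
    (bCounts G).getD s 0 = (G.countP (fun row => decide (s ∈ row)) : Int) := by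
  suffices h : ∀ (L : List (List Int)) (d : PySem.Dict Int Int),
      (L.foldl (fun d row => (PySem.Set.ofList row).foldl (fun d v => d.modify v 0 (· + 1)) d) d).getD s 0
        = d.getD s 0 + (L.countP (fun row => decide (s ∈ row)) : Int) by
    simpa [bCounts] using h G PySem.Dict.empty
  intro L
  induction L with
  | nil => simp
  | cons row rest ih =>
    intro d
    simp only [List.foldl_cons, ih, PySem.Dict.getD_foldl_modify_add_one, List.countP_cons]
    have hc : (PySem.Set.ofList row).count s = if s ∈ row then 1 else 0 := by
      by_cases hs : s ∈ row
      · rw [if_pos hs]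
        exact List.count_eq_one_of_mem (PySem.Set.nodup_ofList row)
          ((PySem.Set.mem_ofList row s).mpr hs)
      · rw [if_neg hs]
        exact List.count_eq_zero.mpr (fun h => hs ((PySem.Set.mem_ofList row s).mp h))
    rw [hc]
    by_cases hs : s ∈ row
    · simp [hs]; ring
    · simp [hs]

theorem bLoop_eq (d : PySem.Dict Int Int) (n : Int) (L : List (Int × List Int)) (found : Bool) :
    bLoop d n L found
      = ((L.all fun p => !p.2.isEmpty || (d.getD p.1 0 == n - 1))
          && (found || L.any fun p => p.2.isEmpty)) := by
  induction L generalizing found with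
  | nil => simp [bLoop]
  | cons p rest ih =>
    obtain ⟨i, row⟩ := p
    by_cases he : row.isEmpty
    · by_cases hok : d.getD i 0 = n - 1
      · simp [bLoop, he, hok, ih]
      · simp [bLoop, he, hok]
    · simp [bLoop, he, ih]

theorem count_all_but_one {l : List Int} {s : Int} {p : Int → Bool}
    (hnd : l.Nodup) (hs : s ∈ l) (hps : p s = false) :
    ((∀ i ∈ l, i ≠ s → p i) ↔ l.countP p = l.length - 1) := by
  induction l with
  | nil => cases hs
  | cons a t ih =>
    rcases List.nodup_cons.mp hnd with ⟨hat, hndt⟩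
    have hcc : (a :: t).countP p = t.countP p + if p a then 1 else 0 := by
      simp [List.countP_cons]
    by_cases has : a = s
    · subst has
      rw [if_neg (by simp [hps])] at hcc
      constructor
      · intro h
        have hct : t.countP p = t.length := by
          rw [List.countP_eq_length]
          intro x hx
          exact h x (List.mem_cons_of_mem _ hx) (fun hxs => hat (hxs ▸ hx))
        simp [hcc, hct]
      · intro h
        have hct : t.countP p = t.length := by
          have hle : t.countP p ≤ t.length := List.countP_le_length
          rw [hcc] at h
          simp only [List.length_cons, Nat.add_zero] at h
          omega
        intro i hi hne
        rcases List.mem_cons.mp hi with h1 | h2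
        · exact absurd h1 hne
        · exact (List.countP_eq_length.mp hct) i h2
    · have hst : s ∈ t := by
        rcases List.mem_cons.mp hs with h1 | h2
        · exact absurd h1.symm has
        · exact h2
      have ht1 : 1 ≤ t.length := List.length_pos_of_mem hst
      have hle : t.countP p ≤ t.length := List.countP_le_length
      have hlt : t.countP p < t.length := by
        rcases Nat.lt_or_ge (t.countP p) t.length with h | h
        · exact h
        · exfalso
          have := List.countP_eq_length.mp (Nat.le_antisymm hle h) s hst
          simp [hps] at this
      constructor
      · intro h
        have hpa : p a = true := h a List.mem_cons_self (fun hh => has hh)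
        have hct : t.countP p = t.length - 1 :=
          (ih hndt hst).mp (fun i hi hne => h i (List.mem_cons_of_mem _ hi) hne)
        rw [if_pos hpa] at hcc
        simp [hcc, hct]
        omega
      · intro h
        by_cases hpa : p a = true
        · rw [if_pos hpa] at hcc
          have hct : t.countP p = t.length - 1 := by
            rw [hcc] at h
            simp at h
            omega
          intro i hi hne
          rcases List.mem_cons.mp hi with h1 | h2
          · exact h1 ▸ hpa
          · exact ((ih hndt hst).mpr hct) i h2 hne
        · exfalso
          rw [if_neg hpa] at hcc
          rw [hcc] at h
          simp only [Nat.add_zero, List.length_cons] at h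
          omega

theorem all_congr_of_mem {l : List Int} {p q : Int → Bool} (h : ∀ x ∈ l, p x = q x) :
    l.all p = l.all q := by
  induction l with
  | nil => rfl
  | cons a t ih =>
    simp only [List.all_cons, h a List.mem_cons_self,
      ih (fun x hx => h x (List.mem_cons_of_mem _ hx))]

-- ===== VERDICT (by name: the statement is the Claim_ definition above) =====
theorem is_universal_sink_spec : Claim_equal_is_universal_sink := by
  intro G _
  unfold Spec_is_universal_sink
  unfold is_universal_sink is_universal_sink_alt
  simp only []
  rw [PySem.List.foldl_append_if_eq_filter]
  rw [PySem.List.enumerate_eq_map_pyRange (d := ([] : List Int)), bLoop_eq]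
  simp only [List.nil_append, List.all_map, List.any_map, Function.comp_def, Bool.false_or,
    PySem.List.len]
  have hiso : ∀ (row : List Int), (row.length == 0) = row.isEmpty := by
    intro row; cases row <;> rfl
  simp only [hiso]
  have hRlen : (PySem.List.pyRange 0 (G.length : Int) 1).length = G.length := by
    simp [PySem.List.length_pyRange_one]
  -- pointwise: for a sink i, A's inner scan equals B's count test
  have hpt : ∀ i ∈ PySem.List.pyRange 0 (G.length : Int) 1,
      (PySem.List.pyGetD G i []).isEmpty = true →
      ((PySem.List.pyRange 0 (G.length : Int) 1).all fun j =>
          if j != i then decide (i ∈ PySem.List.pyGetD G j []) else true)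
        = ((bCounts G).getD i 0 == (G.length : Int) - 1) := by
    intro i hiR hie
    have hrow : PySem.List.pyGetD G i [] = [] := List.isEmpty_iff.mp hie
    have hpi : (fun j => decide (i ∈ PySem.List.pyGetD G j [])) i = false := by
      simp [hrow]
    have hcnt : (PySem.List.pyRange 0 (G.length : Int) 1).countP
        (fun j => decide (i ∈ PySem.List.pyGetD G j []))
        = G.countP (fun row => decide (i ∈ row)) := by
      calc (PySem.List.pyRange 0 (G.length : Int) 1).countP
              (fun j => decide (i ∈ PySem.List.pyGetD G j []))
          = (((PySem.List.pyRange 0 (G.length : Int) 1).map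
              (fun j => PySem.List.pyGetD G j [])).countP (fun row => decide (i ∈ row))) := by
            rw [List.countP_map]; rfl
        _ = G.countP (fun row => decide (i ∈ row)) := by
            rw [PySem.List.map_pyGetD_pyRange_zero']
    have hlen1 : 1 ≤ G.length := by
      have := List.length_pos_of_mem hiR
      omega
    have hiff := count_all_but_one (l := PySem.List.pyRange 0 (G.length : Int) 1)
      (p := fun j => decide (i ∈ PySem.List.pyGetD G j []))
      (PySem.List.nodup_pyRange_one _ _) hiR hpi
    rw [bCounts_getD]
    apply Bool.eq_iff_iff.mpr
    rw [List.all_eq_true, beq_iff_eq]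
    constructor
    · intro h
      have hc : (PySem.List.pyRange 0 (G.length : Int) 1).countP
          (fun j => decide (i ∈ PySem.List.pyGetD G j []))
          = (PySem.List.pyRange 0 (G.length : Int) 1).length - 1 := by
        apply hiff.mp
        intro j hj hne
        have := h j hj
        rw [if_pos (by simp [hne])] at this
        exact this
      rw [hcnt, hRlen] at hc
      omega
    · intro h
      have hc : (PySem.List.pyRange 0 (G.length : Int) 1).countP
          (fun j => decide (i ∈ PySem.List.pyGetD G j []))
          = (PySem.List.pyRange 0 (G.length : Int) 1).length - 1 := by
        rw [hcnt, hRlen]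
        omega
      intro j hj
      by_cases hne : j = i
      · rw [if_neg (by simp [hne])]
      · rw [if_pos (by simp [hne])]
        exact hiff.mpr hc j hj hne
  cases hfe : (PySem.List.pyRange 0 (G.length : Int) 1).filter
      (fun i => (PySem.List.pyGetD G i []).isEmpty) with
  | nil =>
    have hanyf : ((PySem.List.pyRange 0 (G.length : Int) 1).any
        (fun j => (PySem.List.pyGetD G j []).isEmpty)) = false := by
      rw [List.any_eq_false]
      intro x hx
      have := List.filter_eq_nil_iff.mp hfe x hx
      simpa using this
    rw [hanyf]
    simp
  | cons x xs =>
    have hx : x ∈ (PySem.List.pyRange 0 (G.length : Int) 1).filter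
        (fun i => (PySem.List.pyGetD G i []).isEmpty) := by rw [hfe]; simp
    have hanyt : ((PySem.List.pyRange 0 (G.length : Int) 1).any
        (fun j => (PySem.List.pyGetD G j []).isEmpty)) = true :=
      List.any_eq_true.mpr ⟨x, (List.mem_filter.mp hx).1, (List.mem_filter.mp hx).2⟩
    rw [hanyt, Bool.and_true, if_neg (by simp)]
    rw [← hfe]
    have hall : (((PySem.List.pyRange 0 (G.length : Int) 1).filter
        (fun i => (PySem.List.pyGetD G i []).isEmpty)).all fun s =>
          (PySem.List.pyRange 0 (G.length : Int) 1).all fun j =>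
            if j != s then decide (s ∈ PySem.List.pyGetD G j []) else true)
        = (((PySem.List.pyRange 0 (G.length : Int) 1).filter
            (fun i => (PySem.List.pyGetD G i []).isEmpty)).all fun s =>
              (bCounts G).getD s 0 == (G.length : Int) - 1) := by
      exact all_congr_of_mem (fun s hsf =>
        hpt s (List.mem_filter.mp hsf).1 (List.mem_filter.mp hsf).2)
    rw [hall, List.all_filter]
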